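-- pv_equiv track=rewrite | github.com/tiaggohh/Programacion_Thiago_Custiriano | Ejercicios/Cadenas/Desafios/Desafio 1 (Input cadenas)/Desafio 1 (Implementar una funcion que verifique si una cadena representa).py | es_entero
-- ===== SOURCE A (Python) =====
-- def es_entero(cadena):
--     if cadena == "":
--         return False
--
--     for i in range(len(cadena)):
--         c = cadena[i]
--         if i == 0 and (c == '+' or c == '-'):
--             continue
--         if not (ord(c) >= 48 and ord(c) <= 57):
--             return False
--     return True
-- ===== SOURCE B (Python) =====
-- def es_entero(cadena):
--     if cadena == "":
--         return False
--     digitos = sum(c in "0123456789" for c in cadena)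
--     return digitos == len(cadena) or (digitos == len(cadena) - 1 and cadena[0] in "+-")
-- ===== Notes on version B (the rewrite author's own statement) =====
-- stated objective: simpler
-- what changed: Replaces A's indexed loop with a skip branch at i==0 by a counting formulation: count the digit characters once, then decide by one arithmetic comparison (all digits, or all-but-one digit with a sign at position 0).
import Mathlib
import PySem

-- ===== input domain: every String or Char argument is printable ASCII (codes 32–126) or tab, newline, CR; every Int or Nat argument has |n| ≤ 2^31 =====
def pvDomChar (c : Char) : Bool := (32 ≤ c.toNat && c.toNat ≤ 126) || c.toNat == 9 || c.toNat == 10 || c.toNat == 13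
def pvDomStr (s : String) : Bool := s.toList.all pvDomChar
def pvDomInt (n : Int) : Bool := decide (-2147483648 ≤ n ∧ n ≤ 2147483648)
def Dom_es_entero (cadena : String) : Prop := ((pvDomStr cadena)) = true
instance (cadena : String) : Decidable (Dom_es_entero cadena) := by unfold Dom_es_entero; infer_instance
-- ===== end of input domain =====

-- B replaces A's indexed loop (with its i == 0 sign-skip branch) by a counting formulation:
-- count the digit characters once, then decide by one arithmetic comparison; same O(n) cost, simpler.

-- ===== PORT A =====
-- A's indexed for-loop: i is the running index, chars the remaining suffix of the string
def esEnteroLoopA (chars : List Char) (i : Nat) : Bool :=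
  match chars with
  | [] => true
  | c :: rest =>
      if i == 0 && (c == '+' || c == '-') then esEnteroLoopA rest (i + 1)
      else if decide (48 ≤ c.toNat ∧ c.toNat ≤ 57) then esEnteroLoopA rest (i + 1)
      else false

def es_entero (cadena : String) : Bool :=
  if cadena = "" then false
  else esEnteroLoopA cadena.toList 0

-- ===== PORT B =====
def es_entero_alt (cadena : String) : Bool :=
  if cadena = "" then false
  else
    let cs := cadena.toList
    let digitos := cs.countP (fun c => ("0123456789".toList).contains c)
    decide (digitos = cs.length) ||
      (decide (digitos = cs.length - 1) && ("+-".toList).contains cs.head!)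

-- ===== PRECONDITION & SPEC =====
def Spec_es_entero (cadena : String) (out : Bool) : Prop := out = es_entero_alt cadena
instance (cadena : String) (out : Bool) : Decidable (Spec_es_entero cadena out) := by unfold Spec_es_entero; infer_instance

-- ===== CLAIM (what is proved, stated in full; the proofs are below) =====
def Claim_equal_es_entero : Prop := ∀ (cadena : String), Dom_es_entero cadena → Spec_es_entero cadena (es_entero cadena)

-- ===== LEMMAS AND PROOFS =====

-- B's digit-set membership test equals A's ord-range test
theorem digit_mem_eq (c : Char) :
    (("0123456789".toList).contains c) = decide (48 ≤ c.toNat ∧ c.toNat ≤ 57) := by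
  have hd : "0123456789".toList = ['0','1','2','3','4','5','6','7','8','9'] := rfl
  rw [hd]
  have h : ∀ (d : Char), (c == d) = (c.toNat == d.toNat) := by
    intro d
    apply Bool.eq_iff_iff.mpr
    simp only [beq_iff_eq]
    exact ⟨fun h => h ▸ rfl, fun h => Char.ext (UInt32.toNat_inj.mp h)⟩
  simp only [List.contains_cons, List.contains_nil, Bool.or_false, h]
  apply Bool.eq_iff_iff.mpr
  simp only [Bool.or_eq_true, beq_iff_eq, decide_eq_true_eq]
  show c.toNat = 48 ∨ c.toNat = 49 ∨ c.toNat = 50 ∨ c.toNat = 51 ∨ c.toNat = 52 ∨ c.toNat = 53 ∨ c.toNat = 54 ∨ c.toNat = 55 ∨ c.toNat = 56 ∨ c.toNat = 57 ↔ 48 ≤ c.toNat ∧ c.toNat ≤ 57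
  omega

-- the sign test of B equals A's first-index comparison
theorem sign_mem_eq (c : Char) :
    (("+-".toList).contains c) = (c == '+' || c == '-') := by
  have hd : "+-".toList = ['+','-'] := rfl
  rw [hd]
  simp only [List.contains_cons, List.contains_nil, Bool.or_false]

-- a sign character is never a digit
theorem sign_not_digit (c : Char) (hs : (c == '+' || c == '-') = true) :
    (48 ≤ c.toNat ∧ c.toNat ≤ 57) → False := by
  intro hd
  rcases Bool.or_eq_true_iff.mp hs with h | h
  · have : c.toNat = 43 := by rw [beq_iff_eq] at h; subst h; rfl
    omega
  · have : c.toNat = 45 := by rw [beq_iff_eq] at h; subst h; rfl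
    omega

-- past index 0, A's loop is exactly "all characters are digits"
theorem loopA_pos (chars : List Char) (i : Nat) (hi : i ≠ 0) :
    esEnteroLoopA chars i = chars.all (fun c => decide (48 ≤ c.toNat ∧ c.toNat ≤ 57)) := by
  induction chars generalizing i with
  | nil => simp [esEnteroLoopA]
  | cons c rest ih =>
      rw [esEnteroLoopA]
      have h0 : (i == 0) = false := by simp [hi]
      rw [h0]
      simp only [Bool.false_and, List.all_cons]
      by_cases hd : 48 ≤ c.toNat ∧ c.toNat ≤ 57
      · simp [hd, ih (i + 1) (by omega)]
      · simp [hd]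

-- "all digits" as a count equation
theorem all_digits_count (l : List Char) :
    (l.all (fun c => decide (48 ≤ c.toNat ∧ c.toNat ≤ 57)) = true) ↔
      l.countP (fun c => decide (48 ≤ c.toNat ∧ c.toNat ≤ 57)) = l.length := by
  rw [List.all_eq_true, List.countP_eq_length]

-- core equivalence on a non-empty character list
theorem main_list (c : Char) (rest : List Char) :
    esEnteroLoopA (c :: rest) 0 =
      (decide ((c :: rest).countP (fun c => decide (48 ≤ c.toNat ∧ c.toNat ≤ 57)) = (c :: rest).length) ||
       (decide ((c :: rest).countP (fun c => decide (48 ≤ c.toNat ∧ c.toNat ≤ 57)) = (c :: rest).length - 1) &&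
        (c == '+' || c == '-'))) := by
  have hle := List.countP_le_length (l := rest) (p := fun c => decide (48 ≤ c.toNat ∧ c.toNat ≤ 57))
  have hall := all_digits_count rest
  rw [esEnteroLoopA]
  simp only [beq_self_eq_true, Bool.true_and, List.countP_cons, List.length_cons,
    Nat.add_sub_cancel]
  apply Bool.eq_iff_iff.mpr
  by_cases hs : (c == '+' || c == '-') = true
  · have hpc : (decide (48 ≤ c.toNat ∧ c.toNat ≤ 57)) = false := by
      cases hPc : (decide (48 ≤ c.toNat ∧ c.toNat ≤ 57))
      · rfl
      · exact absurd (of_decide_eq_true hPc) (sign_not_digit c hs)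
    rw [hs, hpc, loopA_pos rest 1 one_ne_zero]
    simp only [if_true, Bool.false_eq_true, if_false, Nat.add_zero, Bool.and_true,
      Bool.or_eq_true, decide_eq_true_eq]
    rw [hall]
    omega
  · rw [Bool.not_eq_true] at hs
    rw [hs]
    simp only [Bool.false_eq_true, if_false, Bool.and_false, Bool.or_false, decide_eq_true_eq]
    by_cases hd : 48 ≤ c.toNat ∧ c.toNat ≤ 57
    · rw [if_pos hd, if_pos hd, loopA_pos rest 1 one_ne_zero]
      rw [hall]
      omega
    · rw [if_neg hd, if_neg hd]
      simp only [Bool.false_eq_true, Nat.add_zero, false_iff]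
      omega

-- ===== VERDICT (by name: the statement is the Claim_ definition above) =====
theorem es_entero_spec : Claim_equal_es_entero := by
  intro cadena _
  unfold Spec_es_entero es_entero es_entero_alt
  by_cases h : cadena = ""
  · simp [h]
  · rw [if_neg h, if_neg h]
    cases hc : cadena.toList with
    | nil => exact absurd (by rwa [← String.toList_eq_nil_iff]) h
    | cons c rest =>
        simp only [List.head!_cons, sign_mem_eq]
        conv_rhs => rw [show ((fun c => ("0123456789".toList).contains c) : Char → Bool)
            = (fun c => decide (48 ≤ c.toNat ∧ c.toNat ≤ 57)) from funext digit_mem_eq]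
        exact main_list c rest
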